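-- pv_equiv track=rewrite | github.com/piter2710/Algorytmy | Zadania_Matura/Maj 2024/Zadanie3.py | Nieparzysty_skrot
-- ===== SOURCE A (Python) =====
-- def Nieparzysty_skrot(n):
--
--     m = 0
--     p = 1
--     czy_istnieje = False
--     while(n > 0):
--         ostatnia_cyfra = n % 10
--         if(ostatnia_cyfra % 2 != 0):
--             m = ostatnia_cyfra * p + m
--             p*=10
--             czy_istnieje = True
--         n = n // 10
--     if czy_istnieje:
--         return m
--     return False
-- ===== SOURCE B (Python) =====
-- def Nieparzysty_skrot(n):
--     if n <= 0:
--         return False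
--     m = None
--     for c in str(n):
--         if c in '13579':
--             m = (0 if m is None else m) * 10 + ord(c) - 48
--     return False if m is None else m
-- ===== Notes on version B (the rewrite author's own statement) =====
-- stated objective: idiomatic
-- what changed: B walks the decimal string of n most-significant-first with a single Horner accumulator (None until the first odd digit) instead of peeling digits arithmetically least-significant-first while maintaining a separate power-of-ten multiplier and a flag.
-- outside the precondition, e.g. on Nieparzysty_skrot(0): A returns False, B returns False; on Nieparzysty_skrot(-7): A returns False, B returns False; on Nieparzysty_skrot(2480): A returns False, B returns False
import Mathlib
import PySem

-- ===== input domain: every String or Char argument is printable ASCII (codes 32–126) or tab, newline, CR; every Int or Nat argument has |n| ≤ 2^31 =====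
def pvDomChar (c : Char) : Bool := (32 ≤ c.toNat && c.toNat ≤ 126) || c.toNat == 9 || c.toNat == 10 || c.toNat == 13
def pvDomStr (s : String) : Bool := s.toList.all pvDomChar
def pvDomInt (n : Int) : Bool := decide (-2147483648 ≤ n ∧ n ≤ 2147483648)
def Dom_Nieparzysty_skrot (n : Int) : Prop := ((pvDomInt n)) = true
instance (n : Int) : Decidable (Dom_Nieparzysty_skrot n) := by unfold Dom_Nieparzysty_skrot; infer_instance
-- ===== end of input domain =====

-- B walks the decimal string of n most-significant-first with one optional Horner accumulator,
-- instead of A's least-significant-first arithmetic peel with a power-of-ten multiplier and a flag (objective: idiomatic).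

-- ===== PORT A =====
-- the while loop of A: state (n, m, p, czy_istnieje); returns (m, czy_istnieje)
def pvLoopA (n m p : Int) (czy : Bool) : Int × Bool :=
  if h : n > 0 then
    let ostatnia := PySem.Int.mod n 10
    if PySem.Int.mod ostatnia 2 ≠ 0 then
      pvLoopA (PySem.Int.floordiv n 10) (ostatnia * p + m) (p * 10) true
    else
      pvLoopA (PySem.Int.floordiv n 10) m p czy
  else (m, czy)
termination_by n.toNat
decreasing_by
  all_goals
    rw [PySem.Int.floordiv_eq_ediv_of_pos (by omega : (0:Int) < 10)]
    omega

def Nieparzysty_skrot (n : Int) : Int :=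
  let r := pvLoopA n 0 1 false
  if r.2 then r.1 else 0   -- Python returns False here (not an int); excluded by Pre_, represented as 0

-- ===== PORT B =====
-- the loop body of B
def pvStepB (m : Option Int) (c : Char) : Option Int :=
  if c ∈ (['1', '3', '5', '7', '9'] : List Char) then
    some (m.getD 0 * 10 + ((c.toNat : Int) - 48))  -- (0 if m is None else m), ord(c) - 48
  else m

def Nieparzysty_skrot_alt (n : Int) : Int :=
  if n ≤ 0 then 0   -- Python returns False here (not an int); excluded by Pre_, represented as 0
  else
    match (PySem.Int.toStr n).toList.foldl pvStepB none with
    | some m => m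
    | none => 0     -- Python returns False here; excluded by Pre_

-- ===== PRECONDITION & SPEC =====
-- Pre_ excludes exactly the inputs on which A returns the bool False instead of an int:
-- n ≤ 0 and positive n whose decimal digits are all even.
def Pre_Nieparzysty_skrot (n : Int) : Prop :=
  0 < n ∧ ∃ d ∈ Nat.digits 10 n.toNat, d % 2 = 1
instance (n : Int) : Decidable (Pre_Nieparzysty_skrot n) := by unfold Pre_Nieparzysty_skrot; infer_instance

def pvWitness_Nieparzysty_skrot : Int := 13

def Spec_Nieparzysty_skrot (n : Int) (out : Int) : Prop := out = Nieparzysty_skrot_alt n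
instance (n : Int) (out : Int) : Decidable (Spec_Nieparzysty_skrot n out) := by unfold Spec_Nieparzysty_skrot; infer_instance

-- ===== CLAIM (what is proved, stated in full; the proofs are below) =====
def Claim_equal_Nieparzysty_skrot : Prop := ∀ (n : Int), Dom_Nieparzysty_skrot n → Pre_Nieparzysty_skrot n → Spec_Nieparzysty_skrot n (Nieparzysty_skrot n)

-- ===== LEMMAS AND PROOFS =====

-- the number built from the odd digits of N (kept in order) and the count of odd digits
def oddV (N : Nat) : Int :=
  if _h : N = 0 then 0
  else if N % 10 % 2 = 1 then ((N % 10 : Nat) : Int) + 10 * oddV (N / 10) else oddV (N / 10)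
termination_by N
decreasing_by all_goals exact Nat.div_lt_self (Nat.pos_of_ne_zero _h) (by omega)

def oddC (N : Nat) : Nat :=
  if _h : N = 0 then 0
  else if N % 10 % 2 = 1 then oddC (N / 10) + 1 else oddC (N / 10)
termination_by N
decreasing_by all_goals exact Nat.div_lt_self (Nat.pos_of_ne_zero _h) (by omega)

lemma oddV_zero : oddV 0 = 0 := by rw [oddV]; rfl

lemma oddC_zero : oddC 0 = 0 := by rw [oddC]; rfl

lemma oddV_ne (N : Nat) (h : N ≠ 0) :
    oddV N = if N % 10 % 2 = 1 then ((N % 10 : Nat) : Int) + 10 * oddV (N / 10) else oddV (N / 10) := by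
  rw [oddV]; simp only [h, dite_false]

lemma oddC_ne (N : Nat) (h : N ≠ 0) :
    oddC N = if N % 10 % 2 = 1 then oddC (N / 10) + 1 else oddC (N / 10) := by
  rw [oddC]; simp only [h, dite_false]

lemma oddV_small (N : Nat) (h : N < 10) : oddV N = if N % 2 = 1 then (N : Int) else 0 := by
  by_cases h0 : N = 0
  · subst h0; rw [oddV_zero]; rfl
  · rw [oddV_ne N h0, Nat.mod_eq_of_lt h, Nat.div_eq_of_lt h, oddV_zero]
    split_ifs <;> ring

lemma oddC_small (N : Nat) (h : N < 10) : oddC N = if N % 2 = 1 then 1 else 0 := by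
  by_cases h0 : N = 0
  · subst h0; rw [oddC_zero]; rfl
  · rw [oddC_ne N h0, Nat.mod_eq_of_lt h, Nat.div_eq_of_lt h, oddC_zero]

lemma oddV_of_oddC_zero (N : Nat) (h : oddC N = 0) : oddV N = 0 := by
  induction N using Nat.strong_induction_on with
  | _ N ih =>
    by_cases h0 : N = 0
    · subst h0; exact oddV_zero
    · rw [oddC_ne N h0] at h
      rw [oddV_ne N h0]
      by_cases hp : N % 10 % 2 = 1
      · rw [if_pos hp] at h; omega
      · rw [if_neg hp] at h
        rw [if_neg hp]
        exact ih (N / 10) (Nat.div_lt_self (Nat.pos_of_ne_zero h0) (by omega)) h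

lemma pvLoopA_eq (N : Nat) : ∀ (m p : Int) (c : Bool),
    pvLoopA (N : Int) m p c = (m + p * oddV N, c || decide (oddC N ≠ 0)) := by
  induction N using Nat.strong_induction_on with
  | _ N ih =>
    intro m p c
    by_cases h0 : N = 0
    · subst h0
      rw [pvLoopA, oddV_zero, oddC_zero]
      norm_num
    · have hpos : ((N : Int) > 0) := by exact_mod_cast Nat.pos_of_ne_zero h0
      have e10 : ∀ a : Int, PySem.Int.mod a 10 = a % 10 := fun a => PySem.Int.mod_eq_emod_of_pos (by omega)
      have e2 : ∀ a : Int, PySem.Int.mod a 2 = a % 2 := fun a => PySem.Int.mod_eq_emod_of_pos (by omega)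
      have f10 : ∀ a : Int, PySem.Int.floordiv a 10 = a / 10 := fun a => PySem.Int.floordiv_eq_ediv_of_pos (by omega)
      rw [pvLoopA, dif_pos hpos]
      simp only [e10, e2, f10]
      have hm : ((N : Int) % 10) = ((N % 10 : Nat) : Int) := by omega
      have hd : ((N : Int) / 10) = ((N / 10 : Nat) : Int) := by omega
      have hlt : N / 10 < N := Nat.div_lt_self (Nat.pos_of_ne_zero h0) (by omega)
      rw [hm, hd]
      by_cases hp : N % 10 % 2 = 1
      · rw [if_pos (by omega : ((N % 10 : Nat) : Int) % 2 ≠ 0), ih (N / 10) hlt]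
        rw [oddV_ne N h0, if_pos hp, oddC_ne N h0, if_pos hp]
        simp only [Bool.true_or, Prod.mk.injEq]
        constructor
        · ring
        · simp
      · rw [if_neg (by omega : ¬ ((N % 10 : Nat) : Int) % 2 ≠ 0), ih (N / 10) hlt]
        rw [oddV_ne N h0, if_neg hp, oddC_ne N h0, if_neg hp]

lemma digitChar_mem_odd (d : Nat) (h : d < 10) :
    (Nat.digitChar d ∈ (['1', '3', '5', '7', '9'] : List Char)) ↔ d % 2 = 1 := by
  interval_cases d <;> simp [Nat.digitChar]

lemma digitChar_val (d : Nat) (h : d < 10) :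
    ((Nat.digitChar d).toNat : Int) - 48 = ((d : Nat) : Int) := by
  interval_cases d <;> decide

lemma pvStepB_odd (m : Option Int) (d : Nat) (hd : d < 10) (hp : d % 2 = 1) :
    pvStepB m (Nat.digitChar d) = some (m.getD 0 * 10 + (d : Int)) := by
  rw [pvStepB, if_pos ((digitChar_mem_odd d hd).mpr hp), digitChar_val d hd]

lemma pvStepB_even (m : Option Int) (d : Nat) (hd : d < 10) (hp : d % 2 ≠ 1) :
    pvStepB m (Nat.digitChar d) = m := by
  rw [pvStepB, if_neg (by rw [digitChar_mem_odd d hd]; exact hp)]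

lemma foldB_none (N : Nat) :
    List.foldl pvStepB none (Nat.toDigits 10 N) =
      if oddC N = 0 then none else some (oddV N) := by
  induction N using Nat.strong_induction_on with
  | _ N ih =>
    rw [Nat.toDigits_eq_if (by omega)]
    by_cases hN : N < 10
    · rw [if_pos hN]
      simp only [List.foldl_cons, List.foldl_nil]
      rw [oddV_small N hN, oddC_small N hN]
      by_cases hp : N % 2 = 1
      · rw [pvStepB_odd _ N hN hp, if_pos hp, if_pos hp]
        norm_num
      · rw [pvStepB_even _ N hN hp, if_neg hp, if_neg hp]
        norm_num
    · rw [if_neg hN, List.foldl_append]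
      simp only [List.foldl_cons, List.foldl_nil]
      rw [ih (N / 10) (Nat.div_lt_self (by omega) (by omega))]
      have hd : N % 10 < 10 := Nat.mod_lt _ (by omega)
      have h0 : N ≠ 0 := by omega
      by_cases hc : oddC (N / 10) = 0
      · rw [if_pos hc]
        by_cases hp : N % 10 % 2 = 1
        · rw [pvStepB_odd _ _ hd hp, oddV_ne N h0, if_pos hp, oddC_ne N h0, if_pos hp]
          rw [if_neg (by omega), oddV_of_oddC_zero _ hc]
          norm_num
        · rw [pvStepB_even _ _ hd hp, oddV_ne N h0, if_neg hp, oddC_ne N h0, if_neg hp]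
          rw [if_pos hc]
      · rw [if_neg hc]
        by_cases hp : N % 10 % 2 = 1
        · rw [pvStepB_odd _ _ hd hp, oddV_ne N h0, if_pos hp, oddC_ne N h0, if_pos hp]
          rw [if_neg (by omega)]
          simp only [Option.getD_some, Option.some.injEq]
          ring
        · rw [pvStepB_even _ _ hd hp, oddV_ne N h0, if_neg hp, oddC_ne N h0, if_neg hp]
          rw [if_neg hc]

lemma oddC_ne_zero_iff (N : Nat) (h : 0 < N) :
    (∃ d ∈ Nat.digits 10 N, d % 2 = 1) ↔ oddC N ≠ 0 := by
  induction N using Nat.strong_induction_on with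
  | _ N ih =>
    rw [Nat.digits_def' (by omega : 1 < 10) h]
    have h0 : N ≠ 0 := by omega
    rw [oddC_ne N h0]
    by_cases h10 : N / 10 = 0
    · rw [h10]
      simp only [Nat.digits_zero, List.mem_cons, List.not_mem_nil, or_false, oddC_zero]
      constructor
      · rintro ⟨d, hd, hodd⟩
        rw [hd] at hodd
        rw [if_pos hodd]; omega
      · intro hne
        by_cases hp : N % 10 % 2 = 1
        · exact ⟨N % 10, rfl, hp⟩
        · rw [if_neg hp] at hne; omega
    · have hlt : N / 10 < N := Nat.div_lt_self h (by omega)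
      have ihr := ih (N / 10) hlt (Nat.pos_of_ne_zero h10)
      constructor
      · rintro ⟨d, hd, hodd⟩
        rcases List.mem_cons.mp hd with rfl | h'
        · rw [if_pos hodd]; omega
        · have := ihr.mp ⟨d, h', hodd⟩
          by_cases hp : N % 10 % 2 = 1
          · rw [if_pos hp]; omega
          · rw [if_neg hp]; omega
      · intro hne
        by_cases hp : N % 10 % 2 = 1
        · exact ⟨N % 10, List.mem_cons_self, hp⟩
        · rw [if_neg hp] at hne
          obtain ⟨d, hd, hodd⟩ := ihr.mpr hne
          exact ⟨d, List.mem_cons_of_mem _ hd, hodd⟩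

-- ===== VERDICT (by name: the statement is the Claim_ definition above) =====
theorem Nieparzysty_skrot_spec : Claim_equal_Nieparzysty_skrot := by
  intro n _hdom hpre
  obtain ⟨hn, hodd⟩ := hpre
  unfold Spec_Nieparzysty_skrot Nieparzysty_skrot Nieparzysty_skrot_alt
  have hNn : ((n.toNat : Nat) : Int) = n := Int.toNat_of_nonneg (by omega)
  have hNpos : 0 < n.toNat := by omega
  have hC : oddC n.toNat ≠ 0 := (oddC_ne_zero_iff n.toNat hNpos).mp hodd
  have hA : pvLoopA n 0 1 false = (oddV n.toNat, true) := by
    rw [← hNn, pvLoopA_eq]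
    simp only [Int.toNat_natCast, Bool.false_or, zero_add, one_mul]
    simp [hC]
  have htochars : (PySem.Int.toStr n).toList = Nat.toDigits 10 n.toNat := by
    rw [PySem.Int.toList_toStr, PySem.Int.toChars, if_neg (by omega : ¬ n < 0)]
  rw [htochars, foldB_none, if_neg hC]
  simp only [hA, if_true, if_neg (by omega : ¬ n ≤ 0)]
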